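-- pv_equiv track=rewrite | github.com/AlexTuisov/HW3 | HW3_submission/28_submission/hw3.py | find_populations_sick_1
-- ===== SOURCE A (Python) =====
-- DIRECTIONS = [(1, 0), (-1, 0), (0, 1), (0, -1)]
--
-- def find_populations_sick_1(state_map, n_police, zoc):
--     res_s = []
--     n_rows = len(state_map)
--     n_cols = len(state_map[0])
--     for i in range(n_rows):
--         for j in range(n_cols):
--             if state_map[i][j] == 'S' and zoc[i][j] == 1:
--                 count = 0
--                 for dirc in DIRECTIONS:
--                     i2 = i + dirc[0]
--                     j2 = j + dirc[1]
--                     if 0 <= i2 < n_rows and 0 <= j2 < n_cols: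
--                         if state_map[i2][j2] == 'H':
--                             if zoc[i2][j2] == 1:
--                                 count += 1
--                 if count == 1:
--                     res_s.append((i, j))
--     return res_s
-- ===== SOURCE B (Python) =====
-- DIRECTIONS = [(1, 0), (-1, 0), (0, 1), (0, -1)]
--
-- def find_populations_sick_1(state_map, n_police, zoc):
--     n_rows = len(state_map)
--     n_cols = len(state_map[0])
--     counts = {}
--     for i in range(n_rows):
--         for j in range(n_cols):
--             if state_map[i][j] == 'H' and zoc[i][j] == 1:
--                 for di, dj in DIRECTIONS:
--                     ni, nj = i + di, j + dj
--                     if 0 <= ni < n_rows and 0 <= nj < n_cols and state_map[ni][nj] == 'S' and zoc[ni][nj] == 1: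
--                         counts[(ni, nj)] = counts.get((ni, nj), 0) + 1
--     res = []
--     for i in range(n_rows):
--         for j in range(n_cols):
--             if state_map[i][j] == 'S' and zoc[i][j] == 1 and counts.get((i, j), 0) == 1:
--                 res.append((i, j))
--     return res
-- ===== Notes on version B (the rewrite author's own statement) =====
-- stated objective: alternative
-- what changed: Inverts the traversal: instead of counting healthy neighbours per sick cell with an inner direction scan, B scatters one tally per qualifying healthy cell into a counts dict and then emits, in a second row-major scan, the sick in-zone cells whose tally is exactly 1.
-- outside the precondition, e.g. on find_populations_sick_1([['H']], 0, []): A returns [], B raises IndexError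
import Mathlib
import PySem

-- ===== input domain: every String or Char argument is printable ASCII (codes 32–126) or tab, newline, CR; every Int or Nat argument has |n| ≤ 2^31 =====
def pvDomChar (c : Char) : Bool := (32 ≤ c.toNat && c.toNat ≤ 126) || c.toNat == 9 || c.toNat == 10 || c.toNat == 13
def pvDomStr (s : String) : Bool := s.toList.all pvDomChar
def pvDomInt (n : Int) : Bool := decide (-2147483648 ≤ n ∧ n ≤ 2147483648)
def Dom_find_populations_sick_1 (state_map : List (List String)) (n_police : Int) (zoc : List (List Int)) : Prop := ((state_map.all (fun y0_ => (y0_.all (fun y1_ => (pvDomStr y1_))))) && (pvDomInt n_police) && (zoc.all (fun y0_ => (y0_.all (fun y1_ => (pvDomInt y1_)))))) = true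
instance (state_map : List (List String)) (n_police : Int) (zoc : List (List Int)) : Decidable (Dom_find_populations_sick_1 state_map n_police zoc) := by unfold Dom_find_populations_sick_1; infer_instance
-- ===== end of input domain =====

-- B replaces A's per-sick-cell neighbour count by a scatter pass (each healthy in-zone cell tallies
-- its sick in-zone neighbours into a dict) followed by a row-major emit scan; alternative decomposition,
-- same asymptotic cost. Equality of the RETURN value is claimed on Pre_ (see its comment).

-- ===== PORT A =====
-- shared literal accessors: state_map[i][j] (IndexError → default, excluded by Pre_) and zoc[i][j]
def pvCell (m : List (List String)) (i j : Int) : String :=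
  (PySem.List.pyGet? ((PySem.List.pyGet? m i).getD []) j).getD ""

def pvZ (z : List (List Int)) (i j : Int) : Int :=
  (PySem.List.pyGet? ((PySem.List.pyGet? z i).getD []) j).getD 0

def pvDirs : List (Int × Int) := [(1, 0), (-1, 0), (0, 1), (0, -1)]

def find_populations_sick_1 (state_map : List (List String)) (n_police : Int) (zoc : List (List Int)) : List (Int × Int) :=
  let n_rows : Int := (state_map.length : Int)
  let n_cols : Int := (((PySem.List.pyGet? state_map 0).getD []).length : Int)
  (PySem.List.pyRange 0 n_rows 1).foldl (fun res i =>
    (PySem.List.pyRange 0 n_cols 1).foldl (fun res j =>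
      if pvCell state_map i j = "S" ∧ pvZ zoc i j = 1 then
        let count : Int := pvDirs.foldl (fun c dirc =>
          let i2 := i + dirc.1
          let j2 := j + dirc.2
          if 0 ≤ i2 ∧ i2 < n_rows ∧ 0 ≤ j2 ∧ j2 < n_cols then
            if pvCell state_map i2 j2 = "H" then
              if pvZ zoc i2 j2 = 1 then c + 1 else c
            else c
          else c) 0
        if count = 1 then res ++ [(i, j)] else res
      else res) res) []

-- ===== PORT B =====
def find_populations_sick_1_alt (state_map : List (List String)) (n_police : Int) (zoc : List (List Int)) : List (Int × Int) :=
  let n_rows : Int := (state_map.length : Int)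
  let n_cols : Int := (((PySem.List.pyGet? state_map 0).getD []).length : Int)
  let counts : PySem.Dict (Int × Int) Int :=
    (PySem.List.pyRange 0 n_rows 1).foldl (fun counts i =>
      (PySem.List.pyRange 0 n_cols 1).foldl (fun counts j =>
        if pvCell state_map i j = "H" ∧ pvZ zoc i j = 1 then
          pvDirs.foldl (fun counts d =>
            let ni := i + d.1
            let nj := j + d.2
            if 0 ≤ ni ∧ ni < n_rows ∧ 0 ≤ nj ∧ nj < n_cols ∧ pvCell state_map ni nj = "S" ∧ pvZ zoc ni nj = 1 then
              counts.insert (ni, nj) (counts.getD (ni, nj) 0 + 1)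
            else counts) counts
        else counts) counts) PySem.Dict.empty
  (PySem.List.pyRange 0 n_rows 1).foldl (fun res i =>
    (PySem.List.pyRange 0 n_cols 1).foldl (fun res j =>
      if pvCell state_map i j = "S" ∧ pvZ zoc i j = 1 ∧ counts.getD (i, j) 0 = 1 then
        res ++ [(i, j)]
      else res) res) []

-- ===== PRECONDITION & SPEC =====
-- A raises IndexError on an empty state_map, on a row shorter than row 0, and whenever zoc lacks an
-- entry it reads at an 'S' cell or at an 'H' neighbour it actually inspects; beyond that the third
-- clause also requires a zoc entry at EVERY 'S'/'H' cell (B reads zoc at every in-zone-test of an 'H'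
-- cell, so at a never-inspected 'H' cell A may return while B raises — such inputs are excluded).
def Pre_find_populations_sick_1 (state_map : List (List String)) (n_police : Int) (zoc : List (List Int)) : Prop :=
  state_map ≠ [] ∧
  (∀ row ∈ state_map, (state_map.headD []).length ≤ row.length) ∧
  (∀ i < state_map.length, ∀ j < (state_map.headD []).length,
    ((state_map.getD i []).getD j "" = "S" ∨ (state_map.getD i []).getD j "" = "H") →
    i < zoc.length ∧ j < (zoc.getD i []).length)

instance (state_map : List (List String)) (n_police : Int) (zoc : List (List Int)) : Decidable (Pre_find_populations_sick_1 state_map n_police zoc) := by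
  unfold Pre_find_populations_sick_1; infer_instance

def pvWitness_find_populations_sick_1 : List (List String) × Int × List (List Int) :=
  ([["S", "H"]], 0, [[1, 1]])

def Spec_find_populations_sick_1 (state_map : List (List String)) (n_police : Int) (zoc : List (List Int)) (out : List (Int × Int)) : Prop := out = find_populations_sick_1_alt state_map n_police zoc
instance (state_map : List (List String)) (n_police : Int) (zoc : List (List Int)) (out : List (Int × Int)) : Decidable (Spec_find_populations_sick_1 state_map n_police zoc out) := by unfold Spec_find_populations_sick_1; infer_instance

-- ===== CLAIM (what is proved, stated in full; the proofs are below) =====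
def Claim_equal_find_populations_sick_1 : Prop := ∀ (state_map : List (List String)) (n_police : Int) (zoc : List (List Int)), Dom_find_populations_sick_1 state_map n_police zoc → Pre_find_populations_sick_1 state_map n_police zoc → Spec_find_populations_sick_1 state_map n_police zoc (find_populations_sick_1 state_map n_police zoc)

-- ===== LEMMAS AND PROOFS =====

-- the row-major list of in-bounds cells
def pvCells (nr nc : Int) : List (Int × Int) :=
  (PySem.List.pyRange 0 nr 1).flatMap (fun i => (PySem.List.pyRange 0 nc 1).map (fun j => (i, j)))

-- the keys B's scatter pass increments while visiting cell q, in order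
def pvEmit (sm : List (List String)) (z : List (List Int)) (nr nc : Int) (q : Int × Int) : List (Int × Int) :=
  if pvCell sm q.1 q.2 = "H" ∧ pvZ z q.1 q.2 = 1 then
    (pvDirs.filter (fun d => decide (0 ≤ q.1 + d.1 ∧ q.1 + d.1 < nr ∧ 0 ≤ q.2 + d.2 ∧ q.2 + d.2 < nc ∧
        pvCell sm (q.1 + d.1) (q.2 + d.2) = "S" ∧ pvZ z (q.1 + d.1) (q.2 + d.2) = 1))).map
      (fun d => (q.1 + d.1, q.2 + d.2))
  else []

-- the four neighbours of p, in direction order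
def pvNbrs (p : Int × Int) : List (Int × Int) := pvDirs.map (fun d => (p.1 + d.1, p.2 + d.2))

lemma pvMem_cells (nr nc : Int) (q : Int × Int) :
    q ∈ pvCells nr nc ↔ 0 ≤ q.1 ∧ q.1 < nr ∧ 0 ≤ q.2 ∧ q.2 < nc := by
  rcases q with ⟨a, b⟩
  simp only [pvCells, List.mem_flatMap, List.mem_map, PySem.List.mem_pyRange_one, Prod.ext_iff]
  constructor
  · rintro ⟨i, hi, j, hj, h1, h2⟩
    omega
  · rintro ⟨h1, h2, h3, h4⟩; exact ⟨a, ⟨h1, h2⟩, b, ⟨h3, h4⟩, rfl, rfl⟩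

lemma pvNodup_cells (nr nc : Int) : (pvCells nr nc).Nodup := by
  have h : ∀ m : Int, (PySem.List.pyRange 0 m 1).Nodup := by
    intro m
    by_cases hm : 0 < m
    · obtain ⟨n, rfl⟩ : ∃ n : Nat, m = (n : Int) := ⟨m.toNat, by omega⟩
      rw [PySem.List.pyRange_zero_natCast]
      exact List.nodup_range.map (fun a b => by omega)
    · have : PySem.List.pyRange 0 m 1 = [] := by
        apply List.eq_nil_iff_forall_not_mem.mpr
        intro x hx; rw [PySem.List.mem_pyRange_one] at hx; omega
      simp [this]
  have heq : pvCells nr nc = (PySem.List.pyRange 0 nr 1) ×ˢ (PySem.List.pyRange 0 nc 1) := rfl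
  rw [heq]
  exact List.Nodup.product (h nr) (h nc)

lemma pvNodup_nbrs (p : Int × Int) : (pvNbrs p).Nodup := by
  rcases p with ⟨a, b⟩
  simp [pvNbrs, pvDirs, Prod.ext_iff]

lemma pvCountP_mem_swap {l ms : List (Int × Int)} (hl : l.Nodup) (hm : ms.Nodup)
    (P : Int × Int → Prop) [DecidablePred P] :
    l.countP (fun x => decide (P x ∧ x ∈ ms)) = ms.countP (fun x => decide (P x ∧ x ∈ l)) := by
  rw [List.countP_eq_length_filter, List.countP_eq_length_filter]
  apply List.Perm.length_eq
  apply (List.perm_ext_iff_of_nodup (hl.filter _) (hm.filter _)).mpr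
  intro a
  simp only [List.mem_filter, decide_eq_true_eq]
  tauto

lemma pvEmit_count (sm : List (List String)) (z : List (List Int)) (nr nc : Int) (p q : Int × Int)
    (hS : pvCell sm p.1 p.2 = "S" ∧ pvZ z p.1 p.2 = 1)
    (hB : 0 ≤ p.1 ∧ p.1 < nr ∧ 0 ≤ p.2 ∧ p.2 < nc) :
    (pvEmit sm z nr nc q).count p =
      if (pvCell sm q.1 q.2 = "H" ∧ pvZ z q.1 q.2 = 1) ∧ (p.1 - q.1, p.2 - q.2) ∈ pvDirs then 1 else 0 := by
  unfold pvEmit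
  by_cases hH : pvCell sm q.1 q.2 = "H" ∧ pvZ z q.1 q.2 = 1
  · simp only [hH, if_true, true_and]
    rw [List.count_eq_countP, List.countP_map, List.countP_filter]
    have hcongr : ∀ x ∈ pvDirs,
        ((fun d => ((q.1 + d.1, q.2 + d.2) == p)) x &&
          decide (0 ≤ q.1 + x.1 ∧ q.1 + x.1 < nr ∧ 0 ≤ q.2 + x.2 ∧ q.2 + x.2 < nc ∧
            pvCell sm (q.1 + x.1) (q.2 + x.2) = "S" ∧ pvZ z (q.1 + x.1) (q.2 + x.2) = 1)) = true ↔
        ((q.1 + x.1, q.2 + x.2) == p) = true := by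
      intro x _
      simp only [Bool.and_eq_true, beq_iff_eq, decide_eq_true_eq, and_iff_left_iff_imp]
      intro he
      have e1 : q.1 + x.1 = p.1 := by rw [← he]
      have e2 : q.2 + x.2 = p.2 := by rw [← he]
      rw [e1, e2]
      exact ⟨hB.1, hB.2.1, hB.2.2.1, hB.2.2.2, hS.1, hS.2⟩
    rw [List.countP_congr (by intro x hx; exact hcongr x hx)]
    rcases p with ⟨a, b⟩
    rcases q with ⟨c, d⟩
    simp only [pvDirs, List.countP_cons, List.countP_nil, List.mem_cons, List.not_mem_nil, or_false,
      beq_iff_eq, Prod.mk.injEq]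
    norm_num
    split_ifs <;> omega
  · simp [hH]

lemma pvMem_nbrs (p q : Int × Int) : q ∈ pvNbrs p ↔ (p.1 - q.1, p.2 - q.2) ∈ pvDirs := by
  rcases p with ⟨a, b⟩; rcases q with ⟨c, d⟩
  simp only [pvNbrs, pvDirs, List.mem_map, List.mem_cons, List.not_mem_nil, or_false,
    Prod.mk.injEq, Prod.exists]
  constructor
  · rintro ⟨x, y, h, e1, e2⟩; omega
  · intro h
    rcases h with h | h | h | h
    · exact ⟨-1, 0, by omega⟩
    · exact ⟨1, 0, by omega⟩
    · exact ⟨0, -1, by omega⟩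
    · exact ⟨0, 1, by omega⟩

lemma pvKey_count (sm : List (List String)) (z : List (List Int)) (nr nc : Int) (p : Int × Int)
    (hS : pvCell sm p.1 p.2 = "S" ∧ pvZ z p.1 p.2 = 1)
    (hB : 0 ≤ p.1 ∧ p.1 < nr ∧ 0 ≤ p.2 ∧ p.2 < nc) :
    ((pvCells nr nc).flatMap (pvEmit sm z nr nc)).count p =
      pvDirs.countP (fun d => decide ((0 ≤ p.1 + d.1 ∧ p.1 + d.1 < nr ∧ 0 ≤ p.2 + d.2 ∧ p.2 + d.2 < nc) ∧
        pvCell sm (p.1 + d.1) (p.2 + d.2) = "H" ∧ pvZ z (p.1 + d.1) (p.2 + d.2) = 1)) := by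
  rw [List.count_flatMap]
  have h1 : (pvCells nr nc).map (List.count p ∘ pvEmit sm z nr nc) =
      (pvCells nr nc).map (fun q => if ((pvCell sm q.1 q.2 = "H" ∧ pvZ z q.1 q.2 = 1) ∧ q ∈ pvNbrs p) then 1 else 0) := by
    apply List.map_congr_left
    intro q _
    simp only [Function.comp_apply]
    rw [pvEmit_count sm z nr nc p q hS hB]
    simp only [← pvMem_nbrs]
  rw [h1, PySem.List.sum_map_ite_one_zero_nat']
  rw [pvCountP_mem_swap (pvNodup_cells nr nc) (pvNodup_nbrs p)]
  have h2 : ∀ x ∈ pvNbrs p,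
      (decide ((pvCell sm x.1 x.2 = "H" ∧ pvZ z x.1 x.2 = 1) ∧ x ∈ pvCells nr nc)) = true ↔
      (decide ((0 ≤ x.1 ∧ x.1 < nr ∧ 0 ≤ x.2 ∧ x.2 < nc) ∧ pvCell sm x.1 x.2 = "H" ∧ pvZ z x.1 x.2 = 1)) = true := by
    intro x _
    simp only [decide_eq_true_eq]
    rw [pvMem_cells]
    tauto
  rw [List.countP_congr h2]
  unfold pvNbrs
  rw [List.countP_map]
  apply List.countP_congr
  intro x _
  simp only [Function.comp_apply, decide_eq_true_eq]

lemma pvCountA_eq (sm : List (List String)) (z : List (List Int)) (nr nc i j : Int) :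
    pvDirs.foldl (fun c dirc =>
        if 0 ≤ i + dirc.1 ∧ i + dirc.1 < nr ∧ 0 ≤ j + dirc.2 ∧ j + dirc.2 < nc then
          if pvCell sm (i + dirc.1) (j + dirc.2) = "H" then
            if pvZ z (i + dirc.1) (j + dirc.2) = 1 then c + 1 else c
          else c
        else c) 0 =
    ((pvDirs.countP (fun d => decide ((0 ≤ i + d.1 ∧ i + d.1 < nr ∧ 0 ≤ j + d.2 ∧ j + d.2 < nc) ∧
        pvCell sm (i + d.1) (j + d.2) = "H" ∧ pvZ z (i + d.1) (j + d.2) = 1)) : Nat) : Int) := by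
  trans (pvDirs.foldl (fun c d =>
      if (0 ≤ i + d.1 ∧ i + d.1 < nr ∧ 0 ≤ j + d.2 ∧ j + d.2 < nc) ∧
          pvCell sm (i + d.1) (j + d.2) = "H" ∧ pvZ z (i + d.1) (j + d.2) = 1 then c + 1 else c) 0)
  · apply PySem.List.foldl_congr_mem
    intro acc x _
    by_cases h1 : 0 ≤ i + x.1 ∧ i + x.1 < nr ∧ 0 ≤ j + x.2 ∧ j + x.2 < nc
    · by_cases h2 : pvCell sm (i + x.1) (j + x.2) = "H"
      · by_cases h3 : pvZ z (i + x.1) (j + x.2) = 1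
        · rw [if_pos h1, if_pos h2, if_pos h3, if_pos ⟨h1, h2, h3⟩]
        · rw [if_pos h1, if_pos h2, if_neg h3, if_neg (by tauto)]
      · rw [if_pos h1, if_neg h2, if_neg (by tauto)]
    · rw [if_neg h1, if_neg (by tauto)]
  · rw [PySem.List.foldl_ite_add_one]
    simp only [zero_add]

-- B's scatter pass is the increment fold over the emitted-key list

lemma pvCounts_eq (sm : List (List String)) (z : List (List Int)) (nr nc : Int) :
    (PySem.List.pyRange 0 nr 1).foldl (fun (counts : PySem.Dict (Int × Int) Int) i =>
      (PySem.List.pyRange 0 nc 1).foldl (fun counts j =>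
        if pvCell sm i j = "H" ∧ pvZ z i j = 1 then
          pvDirs.foldl (fun counts d =>
            if 0 ≤ i + d.1 ∧ i + d.1 < nr ∧ 0 ≤ j + d.2 ∧ j + d.2 < nc ∧
                pvCell sm (i + d.1) (j + d.2) = "S" ∧ pvZ z (i + d.1) (j + d.2) = 1 then
              counts.insert (i + d.1, j + d.2) (counts.getD (i + d.1, j + d.2) 0 + 1)
            else counts) counts
        else counts) counts) PySem.Dict.empty =
    ((pvCells nr nc).flatMap (pvEmit sm z nr nc)).foldl
      (fun d x => d.insert x (d.getD x 0 + 1)) PySem.Dict.empty := by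
  rw [List.foldl_flatMap]
  unfold pvCells
  rw [List.foldl_flatMap]
  apply PySem.List.foldl_congr_mem
  intro acc i _
  rw [List.foldl_map]
  apply PySem.List.foldl_congr_mem
  intro acc2 j _
  unfold pvEmit
  dsimp only
  by_cases hH : pvCell sm i j = "H" ∧ pvZ z i j = 1
  · rw [if_pos hH, if_pos hH]
    rw [PySem.List.foldl_ite_eq_foldl_filter
      (p := fun d : Int × Int => 0 ≤ i + d.1 ∧ i + d.1 < nr ∧ 0 ≤ j + d.2 ∧ j + d.2 < nc ∧
        pvCell sm (i + d.1) (j + d.2) = "S" ∧ pvZ z (i + d.1) (j + d.2) = 1)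
      (f := fun (c : PySem.Dict (Int × Int) Int) (d : Int × Int) => c.insert (i + d.1, j + d.2) (c.getD (i + d.1, j + d.2) 0 + 1))]
    rw [List.foldl_map]
  · rw [if_neg hH, if_neg hH, List.foldl_nil]

lemma pvScan_eq (nr nc : Int) (P : Int → Int → Prop) [inst : ∀ i j, Decidable (P i j)] :
    (PySem.List.pyRange 0 nr 1).foldl (fun res i =>
      (PySem.List.pyRange 0 nc 1).foldl (fun res j =>
        if P i j then res ++ [(i, j)] else res) res) ([] : List (Int × Int)) =
    (PySem.List.pyRange 0 nr 1).flatMap (fun i =>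
      ((PySem.List.pyRange 0 nc 1).filter (fun j => decide (P i j))).map (fun j => (i, j))) := by
  trans ((PySem.List.pyRange 0 nr 1).foldl (fun res i =>
      res ++ ((PySem.List.pyRange 0 nc 1).filter (fun j => decide (P i j))).map (fun j => (i, j))) [])
  · apply PySem.List.foldl_congr_mem
    intro acc i _
    rw [PySem.List.foldl_append_ite (p := fun j => P i j) (f := fun j => ((i, j) : Int × Int))]
  · rw [PySem.List.foldl_append_eq_flatMap]
    simp

lemma pvA_norm (sm : List (List String)) (np : Int) (z : List (List Int)) :
    find_populations_sick_1 sm np z =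
    (PySem.List.pyRange 0 (sm.length : Int) 1).flatMap (fun i =>
      ((PySem.List.pyRange 0 (((PySem.List.pyGet? sm 0).getD []).length : Int) 1).filter (fun j =>
        decide (pvCell sm i j = "S" ∧ pvZ z i j = 1 ∧
          ((pvDirs.countP (fun d => decide ((0 ≤ i + d.1 ∧ i + d.1 < (sm.length : Int) ∧
              0 ≤ j + d.2 ∧ j + d.2 < (((PySem.List.pyGet? sm 0).getD []).length : Int)) ∧
            pvCell sm (i + d.1) (j + d.2) = "H" ∧ pvZ z (i + d.1) (j + d.2) = 1)) : Nat) : Int) = 1))).map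
        (fun j => (i, j))) := by
  unfold find_populations_sick_1
  dsimp only
  rw [← pvScan_eq (sm.length : Int) (((PySem.List.pyGet? sm 0).getD []).length : Int)
    (fun i j => pvCell sm i j = "S" ∧ pvZ z i j = 1 ∧
      ((pvDirs.countP (fun d => decide ((0 ≤ i + d.1 ∧ i + d.1 < (sm.length : Int) ∧
          0 ≤ j + d.2 ∧ j + d.2 < (((PySem.List.pyGet? sm 0).getD []).length : Int)) ∧
        pvCell sm (i + d.1) (j + d.2) = "H" ∧ pvZ z (i + d.1) (j + d.2) = 1)) : Nat) : Int) = 1)]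
  apply PySem.List.foldl_congr_mem
  intro acc i _
  apply PySem.List.foldl_congr_mem
  intro res j _
  rw [pvCountA_eq sm z (sm.length : Int) (((PySem.List.pyGet? sm 0).getD []).length : Int) i j]
  by_cases h1 : pvCell sm i j = "S" ∧ pvZ z i j = 1
  · rw [if_pos h1]
    by_cases h2 : ((pvDirs.countP (fun d => decide ((0 ≤ i + d.1 ∧ i + d.1 < (sm.length : Int) ∧
          0 ≤ j + d.2 ∧ j + d.2 < (((PySem.List.pyGet? sm 0).getD []).length : Int)) ∧
        pvCell sm (i + d.1) (j + d.2) = "H" ∧ pvZ z (i + d.1) (j + d.2) = 1)) : Nat) : Int) = 1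
    · rw [if_pos h2, if_pos ⟨h1.1, h1.2, h2⟩]
    · rw [if_neg h2, if_neg (by tauto)]
  · rw [if_neg h1, if_neg (by tauto)]

lemma pvB_norm (sm : List (List String)) (np : Int) (z : List (List Int)) :
    find_populations_sick_1_alt sm np z =
    (PySem.List.pyRange 0 (sm.length : Int) 1).flatMap (fun i =>
      ((PySem.List.pyRange 0 (((PySem.List.pyGet? sm 0).getD []).length : Int) 1).filter (fun j =>
        decide (pvCell sm i j = "S" ∧ pvZ z i j = 1 ∧
          ((((pvCells (sm.length : Int) (((PySem.List.pyGet? sm 0).getD []).length : Int)).flatMap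
              (pvEmit sm z (sm.length : Int) (((PySem.List.pyGet? sm 0).getD []).length : Int))).count (i, j) : Nat) : Int) = 1))).map
        (fun j => (i, j))) := by
  unfold find_populations_sick_1_alt
  dsimp only
  rw [pvCounts_eq sm z (sm.length : Int) (((PySem.List.pyGet? sm 0).getD []).length : Int)]
  simp only [PySem.Dict.getD_foldl_insert_add_one, PySem.Dict.getD_empty, zero_add]
  rw [pvScan_eq (sm.length : Int) (((PySem.List.pyGet? sm 0).getD []).length : Int)
    (fun i j => pvCell sm i j = "S" ∧ pvZ z i j = 1 ∧
      ((((pvCells (sm.length : Int) (((PySem.List.pyGet? sm 0).getD []).length : Int)).flatMap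
          (pvEmit sm z (sm.length : Int) (((PySem.List.pyGet? sm 0).getD []).length : Int))).count (i, j) : Nat) : Int) = 1)]

theorem pvMain (sm : List (List String)) (np : Int) (z : List (List Int)) :
    find_populations_sick_1 sm np z = find_populations_sick_1_alt sm np z := by
  rw [pvA_norm sm np z, pvB_norm sm np z]
  apply List.flatMap_congr
  intro i hi
  congr 1
  apply List.filter_congr
  intro j hj
  rw [decide_eq_decide]
  rw [PySem.List.mem_pyRange_one] at hi hj
  constructor
  · rintro ⟨h1, h2, h3⟩
    refine ⟨h1, h2, ?_⟩
    rw [pvKey_count sm z _ _ (i, j) ⟨h1, h2⟩ ⟨hi.1, hi.2, hj.1, hj.2⟩]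
    exact h3
  · rintro ⟨h1, h2, h3⟩
    refine ⟨h1, h2, ?_⟩
    rw [pvKey_count sm z _ _ (i, j) ⟨h1, h2⟩ ⟨hi.1, hi.2, hj.1, hj.2⟩] at h3
    exact h3

-- ===== VERDICT (by name: the statement is the Claim_ definition above) =====
theorem find_populations_sick_1_spec : Claim_equal_find_populations_sick_1 := by
  intro sm np z _hdom _hpre
  unfold Spec_find_populations_sick_1
  exact pvMain sm np z
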